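-- pv_equiv track=rewrite | github.com/BrianZbr/flatmonitor | app/discover.py | _find_header_indicators
-- ===== SOURCE A (Python) =====
-- from typing import Optional, List, Dict, Any
--
-- def _find_header_indicators(headers) -> List[Dict[str, str]]:
--     """
--     Find bot protection indicators in HTTP response headers.
--     Returns list of dicts with 'source' (header), 'indicator', and 'context'.
--     """
--     found = []
--     headers_lower = {k.lower(): v for k, v in headers.items()}
--
--     # Cloudflare signatures
--     if 'cf-ray' in headers_lower:
--         cf_ray = headers_lower['cf-ray']
--         # Extract location code from cf-ray (last 3 chars before any suffix)
--         location = cf_ray.split('-')[-1][:3] if '-' in cf_ray else 'unknown'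
--         found.append({
--             'source': 'header',
--             'indicator': 'cf-ray',
--             'context': f"Cloudflare proxy detected (location: {location.upper()})"
--         })
--
--     if 'server' in headers_lower:
--         server = headers_lower['server'].lower()
--         if 'cloudflare' in server:
--             found.append({
--                 'source': 'header',
--                 'indicator': 'server:cloudflare',
--                 'context': f"Server header indicates Cloudflare: {headers_lower['server']}"
--             })
--
--     # Akamai signatures
--     if 'x-akamai-request-id' in headers_lower or 'akamai-cache-status' in headers_lower:
--         found.append({
--             'source': 'header',
--             'indicator': 'akamai',
--             'context': "Akamai CDN detected"
--         })
--
--     # Fastly signatures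
--     if 'x-served-by' in headers_lower and 'fastly' in headers_lower.get('x-served-by', '').lower():
--         found.append({
--             'source': 'header',
--             'indicator': 'fastly',
--             'context': f"Fastly CDN detected: {headers_lower['x-served-by']}"
--         })
--
--     # Incapsula/Imperva signatures
--     if 'x-iinfo' in headers_lower or 'incap-ses' in headers_lower:
--         found.append({
--             'source': 'header',
--             'indicator': 'incapsula',
--             'context': "Imperva Incapsula protection detected"
--         })
--
--     # AWS CloudFront
--     if 'x-amz-cf-id' in headers_lower or 'x-amz-cf-pop' in headers_lower:
--         found.append({
--             'source': 'header',
--             'indicator': 'cloudfront',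
--             'context': "AWS CloudFront CDN detected"
--         })
--
--     # DataDome
--     if 'x-datadome' in headers_lower or 'datadome' in headers_lower.get('server', '').lower():
--         found.append({
--             'source': 'header',
--             'indicator': 'datadome',
--             'context': "DataDome bot protection detected"
--         })
--
--     # PerimeterX (now HUMAN)
--     if 'x-perimeter-x' in headers_lower or 'px-captcha' in headers_lower:
--         found.append({
--             'source': 'header',
--             'indicator': 'perimeterx',
--             'context': "PerimeterX (HUMAN) bot protection detected"
--         })
--
--     return found
-- ===== SOURCE B (Python) =====
-- def _find_header_indicators(headers):
--     """
--     Find bot protection indicators in HTTP response headers.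
--     Scan-and-classify: one pass over the (lower-cased) headers classifies each
--     header into the indicators it triggers, collected into a set; then the
--     indicators are emitted in canonical order with their contexts.
--     """
--     hl = {k.lower(): v for k, v in headers.items()}
--
--     KEY_RULES = [
--         ('cf-ray', 'cf-ray'),
--         ('x-akamai-request-id', 'akamai'), ('akamai-cache-status', 'akamai'),
--         ('x-iinfo', 'incapsula'), ('incap-ses', 'incapsula'),
--         ('x-amz-cf-id', 'cloudfront'), ('x-amz-cf-pop', 'cloudfront'),
--         ('x-datadome', 'datadome'),
--         ('x-perimeter-x', 'perimeterx'), ('px-captcha', 'perimeterx'),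
--     ]
--
--     def triggers(k, v):
--         out = [ind for hk, ind in KEY_RULES if hk == k]
--         vl = v.lower()
--         if k == 'server':
--             if 'cloudflare' in vl:
--                 out.append('server:cloudflare')
--             if 'datadome' in vl:
--                 out.append('datadome')
--         elif k == 'x-served-by' and 'fastly' in vl:
--             out.append('fastly')
--         return out
--
--     fired = set()
--     for k, v in hl.items():
--         fired.update(triggers(k, v))
--
--     def context(ind):
--         if ind == 'cf-ray':
--             v = hl['cf-ray']
--             loc = v.split('-')[-1][:3] if '-' in v else 'unknown'
--             return f"Cloudflare proxy detected (location: {loc.upper()})"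
--         if ind == 'server:cloudflare':
--             return f"Server header indicates Cloudflare: {hl['server']}"
--         if ind == 'fastly':
--             return f"Fastly CDN detected: {hl['x-served-by']}"
--         return {
--             'akamai': "Akamai CDN detected",
--             'incapsula': "Imperva Incapsula protection detected",
--             'cloudfront': "AWS CloudFront CDN detected",
--             'datadome': "DataDome bot protection detected",
--             'perimeterx': "PerimeterX (HUMAN) bot protection detected",
--         }[ind]
--
--     ORDER = ['cf-ray', 'server:cloudflare', 'akamai', 'fastly',
--              'incapsula', 'cloudfront', 'datadome', 'perimeterx']
--     return [{'source': 'header', 'indicator': ind, 'context': context(ind)}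
--             for ind in ORDER if ind in fired]
-- ===== Notes on version B (the rewrite author's own statement) =====
-- stated objective: alternative
-- what changed: Inverted the control flow: instead of eight fixed membership/substring queries against the header dict, B makes one classification pass over the headers themselves, mapping each header through a key->indicator rule list (plus value substring rules) into a set of fired indicators, then emits the fired indicators in canonical order.
import Mathlib
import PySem

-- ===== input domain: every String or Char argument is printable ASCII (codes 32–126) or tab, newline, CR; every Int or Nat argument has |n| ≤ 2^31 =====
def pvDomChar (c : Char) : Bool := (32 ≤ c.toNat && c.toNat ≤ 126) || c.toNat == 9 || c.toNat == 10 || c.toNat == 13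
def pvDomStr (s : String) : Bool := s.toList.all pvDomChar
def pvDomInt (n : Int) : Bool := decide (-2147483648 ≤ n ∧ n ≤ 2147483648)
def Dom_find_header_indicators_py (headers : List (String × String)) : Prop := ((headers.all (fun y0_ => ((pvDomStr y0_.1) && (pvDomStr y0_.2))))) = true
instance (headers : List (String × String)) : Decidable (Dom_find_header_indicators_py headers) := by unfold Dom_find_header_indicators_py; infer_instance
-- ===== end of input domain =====

-- B inverts the control flow: one classification pass over the headers collects a set of fired
-- indicators (key->indicator table plus value substring rules), then emits them in canonical order
-- (alternative decomposition; same result, same cost).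


-- ===== PORT A =====
-- literal transliteration of _find_header_indicators: dict comprehension, then eight guarded appends.
-- headers_lower['k'] under an 'in' guard is ported as getD (exact: the key is present there).
def find_header_indicators_py (headers : List (String × String)) : List (List (String × String)) :=
  let headers_lower : PySem.Dict String String :=
    headers.foldl (fun d p => d.insert (PySem.Str.lower p.1) p.2) PySem.Dict.empty
  let found : List (List (String × String)) := []
  let found :=
    if headers_lower.contains "cf-ray" then
      let cf_ray := headers_lower.getD "cf-ray" ""
      let location :=
        if PySem.Str.isIn "-" cf_ray then
          PySem.Str.slice ((PySem.List.pyGet? ((PySem.Str.split? cf_ray "-").getD []) (-1)).getD "") none (some 3)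
        else "unknown"
      found ++ [[("source", "header"), ("indicator", "cf-ray"),
                 ("context", "Cloudflare proxy detected (location: " ++ PySem.Str.upper location ++ ")")]]
    else found
  let found :=
    if headers_lower.contains "server" then
      let server := PySem.Str.lower (headers_lower.getD "server" "")
      if PySem.Str.isIn "cloudflare" server then
        found ++ [[("source", "header"), ("indicator", "server:cloudflare"),
                   ("context", "Server header indicates Cloudflare: " ++ headers_lower.getD "server" "")]]
      else found
    else found
  let found :=
    if headers_lower.contains "x-akamai-request-id" || headers_lower.contains "akamai-cache-status" then
      found ++ [[("source", "header"), ("indicator", "akamai"), ("context", "Akamai CDN detected")]]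
    else found
  let found :=
    if headers_lower.contains "x-served-by" && PySem.Str.isIn "fastly" (PySem.Str.lower (headers_lower.getD "x-served-by" "")) then
      found ++ [[("source", "header"), ("indicator", "fastly"),
                 ("context", "Fastly CDN detected: " ++ headers_lower.getD "x-served-by" "")]]
    else found
  let found :=
    if headers_lower.contains "x-iinfo" || headers_lower.contains "incap-ses" then
      found ++ [[("source", "header"), ("indicator", "incapsula"), ("context", "Imperva Incapsula protection detected")]]
    else found
  let found :=
    if headers_lower.contains "x-amz-cf-id" || headers_lower.contains "x-amz-cf-pop" then
      found ++ [[("source", "header"), ("indicator", "cloudfront"), ("context", "AWS CloudFront CDN detected")]]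
    else found
  let found :=
    if headers_lower.contains "x-datadome" || PySem.Str.isIn "datadome" (PySem.Str.lower (headers_lower.getD "server" "")) then
      found ++ [[("source", "header"), ("indicator", "datadome"), ("context", "DataDome bot protection detected")]]
    else found
  let found :=
    if headers_lower.contains "x-perimeter-x" || headers_lower.contains "px-captcha" then
      found ++ [[("source", "header"), ("indicator", "perimeterx"), ("context", "PerimeterX (HUMAN) bot protection detected")]]
    else found
  found

-- ===== PORT B =====
-- Source B's KEY_RULES: header key -> indicator it triggers by mere presence
def pvKeyRules : List (String × String) :=
  [ ("cf-ray", "cf-ray"),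
    ("x-akamai-request-id", "akamai"), ("akamai-cache-status", "akamai"),
    ("x-iinfo", "incapsula"), ("incap-ses", "incapsula"),
    ("x-amz-cf-id", "cloudfront"), ("x-amz-cf-pop", "cloudfront"),
    ("x-datadome", "datadome"),
    ("x-perimeter-x", "perimeterx"), ("px-captcha", "perimeterx") ]

-- Source B's triggers(k, v): indicators fired by one header
def pvTriggers (k v : String) : List String :=
  let out : List String := (pvKeyRules.filter (fun r => r.1 == k)).map (fun r => r.2)
  let vl := PySem.Str.lower v
  let out :=
    if k == "server" then
      let out := if PySem.Str.isIn "cloudflare" vl then out ++ ["server:cloudflare"] else out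
      if PySem.Str.isIn "datadome" vl then out ++ ["datadome"] else out
    else if k == "x-served-by" && PySem.Str.isIn "fastly" vl then out ++ ["fastly"]
    else out
  out

-- Source B's context(ind) given the lower-cased dict hl (lookups are under a fired guard; getD "" is exact there)
def pvContext (hl : PySem.Dict String String) (ind : String) : String :=
  if ind == "cf-ray" then
    let v := hl.getD "cf-ray" ""
    let loc :=
      if PySem.Str.isIn "-" v then
        PySem.Str.slice ((PySem.List.pyGet? ((PySem.Str.split? v "-").getD []) (-1)).getD "") none (some 3)
      else "unknown"
    "Cloudflare proxy detected (location: " ++ PySem.Str.upper loc ++ ")"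
  else if ind == "server:cloudflare" then
    "Server header indicates Cloudflare: " ++ hl.getD "server" ""
  else if ind == "fastly" then
    "Fastly CDN detected: " ++ hl.getD "x-served-by" ""
  else
    (PySem.Dict.ofList
      [ ("akamai", "Akamai CDN detected"),
        ("incapsula", "Imperva Incapsula protection detected"),
        ("cloudfront", "AWS CloudFront CDN detected"),
        ("datadome", "DataDome bot protection detected"),
        ("perimeterx", "PerimeterX (HUMAN) bot protection detected") ]).getD ind ""

def pvOrder : List String :=
  ["cf-ray", "server:cloudflare", "akamai", "fastly",
   "incapsula", "cloudfront", "datadome", "perimeterx"]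

def find_header_indicators_py_alt (headers : List (String × String)) : List (List (String × String)) :=
  let hl : PySem.Dict String String :=
    headers.foldl (fun d p => d.insert (PySem.Str.lower p.1) p.2) PySem.Dict.empty
  let fired : PySem.Set String :=
    hl.items.foldl (fun s p => PySem.Set.update s (pvTriggers p.1 p.2)) PySem.Set.empty
  pvOrder.filterMap (fun ind =>
    if PySem.Set.contains fired ind then
      some [("source", "header"), ("indicator", ind), ("context", pvContext hl ind)]
    else none)

-- ===== PRECONDITION & SPEC =====
def Spec_find_header_indicators_py (headers : List (String × String)) (out : List (List (String × String))) : Prop := out = find_header_indicators_py_alt headers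
instance (headers : List (String × String)) (out : List (List (String × String))) : Decidable (Spec_find_header_indicators_py headers out) := by unfold Spec_find_header_indicators_py; infer_instance

-- ===== CLAIM (what is proved, stated in full; the proofs are below) =====
def Claim_equal_find_header_indicators_py : Prop := ∀ (headers : List (String × String)), Dom_find_header_indicators_py headers → Spec_find_header_indicators_py headers (find_header_indicators_py headers)

-- ===== LEMMAS AND PROOFS =====

-- membership in the classification fold = some header fires the indicator
theorem mem_foldl_update (l : List (String × String)) (s : PySem.Set String) (x : String) :
    x ∈ l.foldl (fun s p => PySem.Set.update s (pvTriggers p.1 p.2)) s ↔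
      x ∈ s ∨ ∃ p ∈ l, x ∈ pvTriggers p.1 p.2 := by
  induction l generalizing s with
  | nil => simp
  | cons a t ih =>
    simp [List.foldl_cons, ih, PySem.Set.mem_update]
    tauto

-- some item has key c ↔ the dict contains c
theorem exists_item_key (d : PySem.Dict String String) (c : String) :
    (∃ p ∈ d.items, p.1 = c) ↔ d.contains c = true := by
  rw [PySem.Dict.contains_iff_mem_keys]
  simp only [PySem.Dict.keys, List.mem_map]

-- some item has key c with value satisfying a Bool predicate false on "" ↔ the predicate holds of getD c ""
theorem exists_item_key_val (d : PySem.Dict String String) (hnd : d.keys.Nodup)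
    (c : String) (q : String → Bool) (hq : q "" = false) :
    (∃ p ∈ d.items, p.1 = c ∧ q p.2 = true) ↔ q (d.getD c "") = true := by
  constructor
  · rintro ⟨⟨k, v⟩, hp, rfl, hv⟩
    rwa [PySem.Dict.getD_of_mem_items (d := d) hp hnd]
  · intro h
    cases hc : d.contains c with
    | false =>
      rw [PySem.Dict.getD_of_not_contains (d := d) (h := hc)] at h
      rw [hq] at h; cases h
    | true =>
      rw [PySem.Dict.contains_eq_isSome_get?] at hc
      obtain ⟨v, hv⟩ := Option.isSome_iff_exists.mp hc
      refine ⟨(c, v), PySem.Dict.mem_items_of_get?_eq_some (d := d) (h := hv), rfl, ?_⟩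
      rwa [PySem.Dict.getD_of_get?_eq_some (d := d) (h := hv)] at h

-- some item has one of two keys ↔ the dict contains either
theorem exists_item_key_or (d : PySem.Dict String String) (c₁ c₂ : String) :
    (∃ p ∈ d.items, p.1 = c₁ ∨ p.1 = c₂) ↔ (d.contains c₁ || d.contains c₂) = true := by
  rw [Bool.or_eq_true_iff, ← exists_item_key, ← exists_item_key]
  constructor
  · rintro ⟨p, hp, h | h⟩
    · exact Or.inl ⟨p, hp, h⟩
    · exact Or.inr ⟨p, hp, h⟩
  · rintro (⟨p, hp, h⟩ | ⟨p, hp, h⟩) <;> exact ⟨p, hp, by tauto⟩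

-- the lower-cased dict has Nodup keys
theorem nodup_hl (headers : List (String × String)) :
    (headers.foldl (fun d p => d.insert (PySem.Str.lower p.1) p.2) PySem.Dict.empty).keys.Nodup := by
  exact PySem.Dict.nodup_keys_foldl_insert_key headers (fun p => PySem.Str.lower p.1) (fun _ p => p.2)
    PySem.Dict.empty (by simp)

-- the rule-scan comprehension picks exactly the rules keyed by k
theorem mem_filter_rules (rs : List (String × String)) (ind k : String) :
    ind ∈ (rs.filter (fun r => r.1 == k)).map (fun r => r.2) ↔ (k, ind) ∈ rs := by
  simp only [List.mem_map, List.mem_filter, beq_iff_eq]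
  constructor
  · rintro ⟨⟨a, b⟩, ⟨hm, rfl⟩, rfl⟩; exact hm
  · intro hm; exact ⟨(k, ind), ⟨hm, rfl⟩, rfl⟩

-- which indicators a single header (k, v) triggers, per indicator string
theorem triggers_cfray (k v : String) : ("cf-ray" ∈ pvTriggers k v) ↔ k = "cf-ray" := by
  simp only [pvTriggers]
  split_ifs <;> simp_all [mem_filter_rules, pvKeyRules]
theorem triggers_sc (k v : String) :
    ("server:cloudflare" ∈ pvTriggers k v) ↔ k = "server" ∧ PySem.Str.isIn "cloudflare" (PySem.Str.lower v) = true := by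
  simp only [pvTriggers]
  split_ifs <;> simp_all [mem_filter_rules, pvKeyRules]
theorem triggers_akamai (k v : String) :
    ("akamai" ∈ pvTriggers k v) ↔ k = "x-akamai-request-id" ∨ k = "akamai-cache-status" := by
  simp only [pvTriggers]
  split_ifs <;> simp_all [mem_filter_rules, pvKeyRules]
theorem triggers_fastly (k v : String) :
    ("fastly" ∈ pvTriggers k v) ↔ k = "x-served-by" ∧ PySem.Str.isIn "fastly" (PySem.Str.lower v) = true := by
  simp only [pvTriggers]
  split_ifs <;> simp_all [mem_filter_rules, pvKeyRules]
theorem triggers_incap (k v : String) :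
    ("incapsula" ∈ pvTriggers k v) ↔ k = "x-iinfo" ∨ k = "incap-ses" := by
  simp only [pvTriggers]
  split_ifs <;> simp_all [mem_filter_rules, pvKeyRules]
theorem triggers_cfront (k v : String) :
    ("cloudfront" ∈ pvTriggers k v) ↔ k = "x-amz-cf-id" ∨ k = "x-amz-cf-pop" := by
  simp only [pvTriggers]
  split_ifs <;> simp_all [mem_filter_rules, pvKeyRules]
theorem triggers_dd (k v : String) :
    ("datadome" ∈ pvTriggers k v) ↔
      k = "x-datadome" ∨ (k = "server" ∧ PySem.Str.isIn "datadome" (PySem.Str.lower v) = true) := by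
  simp only [pvTriggers]
  split_ifs <;> simp_all [mem_filter_rules, pvKeyRules]
theorem triggers_px (k v : String) :
    ("perimeterx" ∈ pvTriggers k v) ↔ k = "x-perimeter-x" ∨ k = "px-captcha" := by
  simp only [pvTriggers]
  split_ifs <;> simp_all [mem_filter_rules, pvKeyRules]

-- one step of B's uniform emit loop
theorem filterMap_cons_toList {α β : Type} (f : α → Option β) (a : α) (l : List α) :
    List.filterMap f (a :: l) = (f a).toList ++ List.filterMap f l := by
  cases h : f a <;> simp [h]

theorem ite_some_toList {α : Type} (c : Bool) (e : α) :
    (if c then some e else none : Option α).toList = if c then [e] else [] := by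
  cases c <;> rfl

-- a guarded append step, as 'previous ++ optional tail'
theorem step_append {α : Type} (c : Bool) (prev x : List α) :
    (if c then prev ++ x else prev) = prev ++ (if c then x else []) := by
  cases c <;> simp

-- two nested guards collapse to one conjunction
theorem ite_ite_and {α : Type} (a b : Bool) (x : List α) :
    (if a then (if b then x else []) else []) = if (a && b) then x else [] := by
  cases a <;> simp

-- a substring test on a value the dict does not hold is false (hl.get(k,'') = "")
theorem isIn_lower_getD_of_not_contains (hl : PySem.Dict String String) (k sub : String)
    (hsub : PySem.Str.isIn sub "" = false) (h : hl.contains k = false) :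
    PySem.Str.isIn sub (PySem.Str.lower (hl.getD k "")) = false := by
  rw [PySem.Dict.getD_of_not_contains (d := hl) (k := k) (h := h)]
  simpa [PySem.Chars.lower] using hsub

-- A's guarded test 'k in hl and sub in hl[k].lower()' equals 'sub in hl.get(k,"").lower()'
theorem guard_collapse (hl : PySem.Dict String String) (k sub : String)
    (hsub : PySem.Str.isIn sub "" = false) :
    (hl.contains k && PySem.Str.isIn sub (PySem.Str.lower (hl.getD k ""))) =
      PySem.Str.isIn sub (PySem.Str.lower (hl.getD k "")) := by
  by_cases h : hl.contains k = true
  · simp [h]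
  · simp only [Bool.not_eq_true] at h
    rw [isIn_lower_getD_of_not_contains hl k sub hsub h, h]
    simp

-- the fired set's membership, per indicator, as A's dict-query condition
theorem fired_contains (hl : PySem.Dict String String) (ind : String)
    (cond : Bool)
    (hiff : (∃ p ∈ hl.items, ind ∈ pvTriggers p.1 p.2) ↔ cond = true) :
    PySem.Set.contains
      (hl.items.foldl (fun s p => PySem.Set.update s (pvTriggers p.1 p.2)) PySem.Set.empty) ind = cond := by
  rw [Bool.eq_iff_iff, PySem.Set.contains_iff, mem_foldl_update]
  simp [PySem.Set.empty, hiff]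

-- ===== VERDICT (by name: the statement is the Claim_ definition above) =====
theorem find_header_indicators_py_spec : Claim_equal_find_header_indicators_py := by
  intro headers _
  show find_header_indicators_py headers = find_header_indicators_py_alt headers
  unfold find_header_indicators_py find_header_indicators_py_alt
  set hl := headers.foldl (fun d p => d.insert (PySem.Str.lower p.1) p.2) PySem.Dict.empty with hhl
  have hnd : hl.keys.Nodup := nodup_hl headers
  -- rewrite each fired-set membership into A's condition
  have h1 := fired_contains hl "cf-ray" (hl.contains "cf-ray") (by
    simp only [triggers_cfray]; rw [exists_item_key])
  have h2 := fired_contains hl "server:cloudflare"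
      (PySem.Str.isIn "cloudflare" (PySem.Str.lower (hl.getD "server" ""))) (by
    simp only [triggers_sc]
    exact exists_item_key_val hl hnd "server"
      (fun v => PySem.Str.isIn "cloudflare" (PySem.Str.lower v)) (by decide))
  have h3 := fired_contains hl "akamai"
      (hl.contains "x-akamai-request-id" || hl.contains "akamai-cache-status") (by
    simp only [triggers_akamai]
    exact exists_item_key_or hl "x-akamai-request-id" "akamai-cache-status")
  have h4 := fired_contains hl "fastly"
      (PySem.Str.isIn "fastly" (PySem.Str.lower (hl.getD "x-served-by" ""))) (by
    simp only [triggers_fastly]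
    exact exists_item_key_val hl hnd "x-served-by"
      (fun v => PySem.Str.isIn "fastly" (PySem.Str.lower v)) (by decide))
  have h5 := fired_contains hl "incapsula"
      (hl.contains "x-iinfo" || hl.contains "incap-ses") (by
    simp only [triggers_incap]
    exact exists_item_key_or hl "x-iinfo" "incap-ses")
  have h6 := fired_contains hl "cloudfront"
      (hl.contains "x-amz-cf-id" || hl.contains "x-amz-cf-pop") (by
    simp only [triggers_cfront]
    exact exists_item_key_or hl "x-amz-cf-id" "x-amz-cf-pop")
  have h7 := fired_contains hl "datadome"
      (hl.contains "x-datadome" || PySem.Str.isIn "datadome" (PySem.Str.lower (hl.getD "server" ""))) (by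
    simp only [triggers_dd]
    constructor
    · rintro ⟨p, hp, h | ⟨hk, hv⟩⟩
      · exact Bool.or_eq_true_iff.mpr (Or.inl ((exists_item_key hl _).mp ⟨p, hp, h⟩))
      · refine Bool.or_eq_true_iff.mpr (Or.inr ?_)
        exact (exists_item_key_val hl hnd "server"
          (fun v => PySem.Str.isIn "datadome" (PySem.Str.lower v)) (by decide)).mp ⟨p, hp, hk, hv⟩
    · intro h
      rcases Bool.or_eq_true_iff.mp h with h | h
      · obtain ⟨p, hp, hk⟩ := (exists_item_key hl _).mpr h
        exact ⟨p, hp, Or.inl hk⟩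
      · obtain ⟨p, hp, hk, hv⟩ := (exists_item_key_val hl hnd "server"
          (fun v => PySem.Str.isIn "datadome" (PySem.Str.lower v)) (by decide)).mpr h
        exact ⟨p, hp, Or.inr ⟨hk, hv⟩⟩)
  have h8 := fired_contains hl "perimeterx"
      (hl.contains "x-perimeter-x" || hl.contains "px-captcha") (by
    simp only [triggers_px]
    exact exists_item_key_or hl "x-perimeter-x" "px-captcha")
  have c_0 : (PySem.Dict.ofList
      [ ("akamai", "Akamai CDN detected"),
        ("incapsula", "Imperva Incapsula protection detected"),
        ("cloudfront", "AWS CloudFront CDN detected"),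
        ("datadome", "DataDome bot protection detected"),
        ("perimeterx", "PerimeterX (HUMAN) bot protection detected") ]).getD "akamai" "" = "Akamai CDN detected" := by decide
  have c_1 : (PySem.Dict.ofList
      [ ("akamai", "Akamai CDN detected"),
        ("incapsula", "Imperva Incapsula protection detected"),
        ("cloudfront", "AWS CloudFront CDN detected"),
        ("datadome", "DataDome bot protection detected"),
        ("perimeterx", "PerimeterX (HUMAN) bot protection detected") ]).getD "incapsula" "" = "Imperva Incapsula protection detected" := by decide
  have c_2 : (PySem.Dict.ofList
      [ ("akamai", "Akamai CDN detected"),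
        ("incapsula", "Imperva Incapsula protection detected"),
        ("cloudfront", "AWS CloudFront CDN detected"),
        ("datadome", "DataDome bot protection detected"),
        ("perimeterx", "PerimeterX (HUMAN) bot protection detected") ]).getD "cloudfront" "" = "AWS CloudFront CDN detected" := by decide
  have c_3 : (PySem.Dict.ofList
      [ ("akamai", "Akamai CDN detected"),
        ("incapsula", "Imperva Incapsula protection detected"),
        ("cloudfront", "AWS CloudFront CDN detected"),
        ("datadome", "DataDome bot protection detected"),
        ("perimeterx", "PerimeterX (HUMAN) bot protection detected") ]).getD "datadome" "" = "DataDome bot protection detected" := by decide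
  have c_4 : (PySem.Dict.ofList
      [ ("akamai", "Akamai CDN detected"),
        ("incapsula", "Imperva Incapsula protection detected"),
        ("cloudfront", "AWS CloudFront CDN detected"),
        ("datadome", "DataDome bot protection detected"),
        ("perimeterx", "PerimeterX (HUMAN) bot protection detected") ]).getD "perimeterx" "" = "PerimeterX (HUMAN) bot protection detected" := by decide
  simp only [pvOrder, pvContext, c_0, c_1, c_2, c_3, c_4, filterMap_cons_toList, List.filterMap_nil,
    h1, h2, h3, h4, h5, h6, h7, h8, ite_some_toList, step_append, ite_ite_and,
    guard_collapse hl "server" "cloudflare" (by decide),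
    guard_collapse hl "x-served-by" "fastly" (by decide)]
  simp [List.append_assoc]
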